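-- pv_equiv track=rewrite | github.com/qnaeub/Algorithm-Study | 프로그래머스/1/135808. 과일 장수/과일 장수.py | solution
-- ===== SOURCE A (Python) =====
-- def solution(k, m, score):
--     score.sort(reverse=True)
--     score = [score[i:i+m] for i in range(0, len(score), m)]
--     if len(score[-1]) < m:
--         del score[-1]
--
--     answer = 0
--     for i in range(len(score)):
--         answer += score[i][-1] * m
--
--     return answer
-- ===== SOURCE B (Python) =====
-- def solution(k, m, score):
--     # Sort ascending once; the kept boxes' minimum scores sit at fixed
--     # stride-m positions counted from the remainder offset, so no chunk
--     # lists are ever built.  (Unlike A, this does not mutate `score`.)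
--     s = sorted(score)
--     return m * sum(s[len(s) % m :: m])
-- ===== Notes on version B (the rewrite author's own statement) =====
-- stated objective: simpler
-- what changed: A reverse-sorts, materialises the list of m-sized chunk slices, deletes a short tail chunk and loops over the chunks adding last-element*m; B sorts ascending once and reads the answer off directly as m times the sum of the strided slice s[len(s)%m::m], building no intermediate chunk lists.
import Mathlib
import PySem

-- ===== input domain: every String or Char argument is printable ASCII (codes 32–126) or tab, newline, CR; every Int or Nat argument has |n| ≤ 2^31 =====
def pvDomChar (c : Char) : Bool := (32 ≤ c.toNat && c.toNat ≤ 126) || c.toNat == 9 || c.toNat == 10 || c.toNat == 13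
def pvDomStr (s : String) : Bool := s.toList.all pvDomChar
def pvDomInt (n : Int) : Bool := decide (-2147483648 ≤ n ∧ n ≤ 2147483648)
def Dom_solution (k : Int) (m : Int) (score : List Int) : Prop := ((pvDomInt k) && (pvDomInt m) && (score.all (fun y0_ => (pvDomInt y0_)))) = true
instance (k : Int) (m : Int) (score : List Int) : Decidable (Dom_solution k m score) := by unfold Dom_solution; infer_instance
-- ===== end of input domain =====

-- B replaces A's chunk-list construction by a direct strided-slice sum (simpler, no intermediate
-- lists); equivalence is about the RETURN value only — A sorts `score` in place, B does not.

-- ===== PORT A =====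
def solution (k : Int) (m : Int) (score : List Int) : Int :=
  let s := PySem.List.sorted score (fun x => x) true
  let chunks := (PySem.List.pyRange 0 (s.length : Int) m).map
    (fun i => PySem.List.slice s (some i) (some (i + m)))
  -- `del score[-1]` / `score[-1]` on an empty chunk list raises in Python (excluded by Pre_);
  -- the `.getD []` defaults below are only reached outside Pre_.
  let chunks2 := if (((PySem.List.pyGet? chunks (-1)).getD []).length : Int) < m then chunks.dropLast else chunks
  (PySem.List.pyRange 0 (chunks2.length : Int) 1).foldl
    (fun acc i => acc + (PySem.List.pyGetD (PySem.List.pyGetD chunks2 i []) (-1) 0) * m) 0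

-- ===== PORT B =====
def solution_alt (k : Int) (m : Int) (score : List Int) : Int :=
  let s := PySem.List.sorted score (fun x => x) false
  m * ((PySem.List.slice? s (some (PySem.Int.mod (s.length : Int) m)) none m).getD []).sum

-- ===== PRECONDITION & SPEC =====
-- Pre_ excludes exactly the inputs where A raises: m ≤ 0 (range step / empty chunk list) and
-- empty score (IndexError on score[-1]); A returns normally on every other input.
def Pre_solution (k : Int) (m : Int) (score : List Int) : Prop := 1 ≤ m ∧ score ≠ []
instance (k : Int) (m : Int) (score : List Int) : Decidable (Pre_solution k m score) := by unfold Pre_solution; infer_instance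
def pvWitness_solution : Int × Int × List Int := (3, 2, [1, 2, 3])

def Spec_solution (k : Int) (m : Int) (score : List Int) (out : Int) : Prop := out = solution_alt k m score
instance (k : Int) (m : Int) (score : List Int) (out : Int) : Decidable (Spec_solution k m score out) := by unfold Spec_solution; infer_instance

-- ===== CLAIM (what is proved, stated in full; the proofs are below) =====
def Claim_equal_solution : Prop := ∀ (k : Int) (m : Int) (score : List Int), Dom_solution k m score → Pre_solution k m score → Spec_solution k m score (solution k m score)

-- ===== LEMMAS AND PROOFS =====

lemma sorted_rev_eq_reverse (score : List Int) :
    PySem.List.sorted score (fun x => x) true = (PySem.List.sorted score (fun x => x) false).reverse := by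
  apply List.Perm.eq_of_pairwise (le := fun a b : Int => b ≤ a)
  · intro a b _ _ h1 h2; omega
  · exact PySem.List.sorted_pairwise_rev score (fun x => x)
  · exact (List.pairwise_reverse).mpr (by
      simpa using PySem.List.sorted_pairwise score (fun x => x))
  · exact ((PySem.List.sorted_perm score _ true).trans
      ((PySem.List.sorted_perm score (fun x => x) false).symm)).trans
      (List.reverse_perm _).symm

-- chunk list closed form
lemma chunks_closed (d : List Int) (M : Nat) (hM : 1 ≤ M) :
    (PySem.List.pyRange 0 (d.length : Int) ((M:Nat):Int)).map
      (fun i => PySem.List.slice d (some i) (some (i + ((M:Nat):Int))))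
    = (List.range ((d.length + M - 1) / M)).map (fun kk => (d.drop (M * kk)).take M) := by
  have h0 : (0:Int) < ((M:Nat):Int) := by exact_mod_cast (by omega : 0 < M)
  rw [PySem.List.pyRange_of_pos 0 (d.length : Int) h0]
  rw [List.map_map]
  have hcnt : (if (0:Int) < (d.length:Int) then (((d.length:Int) - 0 + M - 1) / M).toNat else 0)
      = (d.length + M - 1) / M := by
    by_cases hc : (0:Int) < (d.length:Int)
    · rw [if_pos hc]
      have e1 : (d.length:Int) - 0 + (M:Nat) - 1 = ((d.length + M - 1 : Nat) : Int) := by omega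
      rw [e1, ← Int.natCast_div, Int.toNat_natCast]
    · rw [if_neg hc]
      have hd0 : d.length = 0 := by omega
      rw [hd0]
      have : (0 + M - 1) / M = 0 := Nat.div_eq_of_lt (by omega)
      omega
  rw [hcnt]
  apply List.map_congr_left
  intro kk hkk
  simp only [Function.comp_apply]
  have e2 : (0:Int) + (M:Nat) * (kk:Nat) = ((M * kk : Nat) : Int) := by push_cast; ring
  rw [e2]
  rw [PySem.List.slice_toNat d (by positivity) (by positivity)]
  congr 1
  omega


-- after the del-branch, the chunk list is exactly the q = n/M full chunks
lemma chunks2_closed (d : List Int) (M : Nat) (hM : 1 ≤ M) (hd : d ≠ []) :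
    (if ((((PySem.List.pyGet? ((List.range ((d.length + M - 1) / M)).map
            (fun kk => (d.drop (M * kk)).take M)) (-1)).getD []).length : Nat) : Int) < ((M:Nat):Int) then
        ((List.range ((d.length + M - 1) / M)).map (fun kk => (d.drop (M * kk)).take M)).dropLast
      else ((List.range ((d.length + M - 1) / M)).map (fun kk => (d.drop (M * kk)).take M)))
    = (List.range (d.length / M)).map (fun kk => (d.drop (M * kk)).take M) := by
  have hN : 1 ≤ d.length := List.length_pos_iff.mpr hd
  set N := d.length with hNdef
  set q := N / M with hq
  set R := N % M with hR
  have hdm : M * q + R = N := by rw [hq, hR]; exact Nat.div_add_mod N M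
  have hRlt : R < M := Nat.mod_lt N (by omega)
  have hqq : q = N / M := hq
  clear_value q R
  -- Q = number of raw chunks
  have hQ : (N + M - 1) / M = q + (if R = 0 then 0 else 1) := by
    have hcm : q * M = M * q := Nat.mul_comm _ _
    have e1 : N + M - 1 = (R + M - 1) + q * M := by omega
    rw [e1, Nat.add_mul_div_right _ _ (show 0 < M by omega)]
    by_cases hR0 : R = 0
    · rw [hR0, if_pos rfl, Nat.div_eq_of_lt (by omega)]
      omega
    · rw [if_neg hR0]
      have : (R + M - 1) / M = 1 := Nat.div_eq_of_lt_le (by omega) (by omega)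
      omega
  -- last raw chunk
  have hQpos : 1 ≤ (N + M - 1) / M := by
    rw [hQ]; by_cases hR0 : R = 0
    · rw [if_pos hR0]
      rcases Nat.eq_zero_or_pos q with h|h
      · exfalso; rw [h, Nat.mul_zero] at hdm; omega
      · omega
    · rw [if_neg hR0]; omega
  have hlast : PySem.List.pyGet? ((List.range ((N + M - 1) / M)).map
      (fun kk => (d.drop (M * kk)).take M)) (-1)
      = some ((d.drop (M * ((N + M - 1) / M - 1))).take M) := by
    rw [PySem.List.pyGet?_neg_one, List.getLast?_eq_getElem?]
    simp only [List.length_map, List.length_range]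
    rw [List.getElem?_map, List.getElem?_range (by omega)]
    rfl
  rw [hlast]
  simp only [Option.getD_some]
  by_cases hR0 : R = 0
  · have hq1 : 1 ≤ q := by
      rcases Nat.eq_zero_or_pos q with h|h
      · exfalso; rw [h, Nat.mul_zero] at hdm; omega
      · exact h
    have hQe : (N + M - 1) / M = q := by rw [hQ, if_pos hR0]; omega
    have hms : M * (q - 1) + M = M * q := by
      cases q with
      | zero => omega
      | succ p => simp [Nat.mul_succ]
    have hlen : ((d.drop (M * ((N + M - 1) / M - 1))).take M).length = M := by
      rw [hQe]
      simp only [List.length_take, List.length_drop, ← hNdef]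
      omega
    simp only [hlen]
    rw [if_neg (lt_irrefl _), hQe]
  · have hQe : (N + M - 1) / M = q + 1 := by rw [hQ, if_neg hR0]
    have hlen : ((d.drop (M * ((N + M - 1) / M - 1))).take M).length = R := by
      rw [hQe]
      simp only [List.length_take, List.length_drop, ← hNdef, Nat.add_sub_cancel]
      omega
    simp only [hlen]
    rw [if_pos (by exact_mod_cast hRlt), hQe, ← List.map_dropLast,
      List.range_succ, List.dropLast_concat]

lemma a_closed (k m : Int) (score : List Int) (hm : 1 ≤ m) (hne : score ≠ []) :
    solution k m score =
      m * ((List.range (score.length / m.toNat)).map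
        (fun j => ((PySem.List.sorted score (fun x => x) true)[m.toNat * j + m.toNat - 1]?).getD 0)).sum := by
  have hmE : m = ((m.toNat : Nat) : Int) := (Int.toNat_of_nonneg (by omega)).symm
  have hM : 1 ≤ m.toNat := by omega
  set M := m.toNat with hMdef
  set d := PySem.List.sorted score (fun x => x) true with hd
  have hdne : d ≠ [] := by
    rw [hd, Ne, PySem.List.sorted_eq_nil_iff]
    exact hne
  have hdl : d.length = score.length := PySem.List.length_sorted score _ true
  unfold solution
  dsimp only
  rw [← hd]
  rw [hmE, chunks_closed d M hM, chunks2_closed d M hM hdne]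
  rw [PySem.List.foldl_pyRange_zero_pyGetD' ((List.range (d.length / M)).map (fun kk => (d.drop (M * kk)).take M)) []
    (fun acc c => acc + (PySem.List.pyGetD c (-1) 0) * ((M:Nat):Int)) 0]
  rw [PySem.List.foldl_add, List.map_map, zero_add]
  have hmc : ∀ kk ∈ List.range (d.length / M),
      ((fun c => PySem.List.pyGetD c (-1) 0 * ((M:Nat):Int)) ∘ (fun kk => (d.drop (M * kk)).take M)) kk
        = (fun j => (d[M * j + M - 1]?).getD 0 * ((M:Nat):Int)) kk := by
    intro kk hkk
    simp only [Function.comp_apply]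
    congr 1
    have hkq : kk < d.length / M := List.mem_range.mp hkk
    have hmul : M * (kk + 1) ≤ M * (d.length / M) := Nat.mul_le_mul_left M (by omega)
    have hma : M * (kk + 1) = M * kk + M := by ring
    have hdm2 : M * (d.length / M) + d.length % M = d.length := Nat.div_add_mod _ _
    have hfull : M * kk + M ≤ d.length := by omega
    have hlen : ((d.drop (M * kk)).take M).length = M := by
      simp only [List.length_take, List.length_drop]
      omega
    rw [PySem.List.pyGetD, PySem.List.pyGet?_neg_one, List.getLast?_eq_getElem?, hlen]
    rw [List.getElem?_take_of_lt (by omega : M - 1 < M), List.getElem?_drop]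
    have hix : M * kk + (M - 1) = M * kk + M - 1 := by omega
    rw [hix]
  rw [List.map_congr_left hmc]
  rw [List.sum_map_mul_right, mul_comm, hdl]

lemma slice_step_closed (xs : List Int) (M : Nat) (hM : 1 ≤ M) :
    PySem.List.slice? xs (some ((xs.length % M : Nat) : Int)) none ((M:Nat):Int) =
      some ((List.range (xs.length / M)).map (fun j => (xs[xs.length % M + M * j]?).getD 0)) := by
  have hMz : ((M:Nat):Int) ≠ 0 := by exact_mod_cast (by omega : M ≠ 0)
  have h0 : (0:Int) < (M:Nat) := by exact_mod_cast (by omega : 0 < M)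
  have h1 : ¬((M:Nat):Int) < 0 := by omega
  have h2 : ¬((xs.length % M : Nat) : Int) < 0 := by
    have := Int.natCast_nonneg (xs.length % M); omega
  have hRle : ((xs.length % M : Nat) : Int) ≤ (xs.length : Int) := by exact_mod_cast Nat.mod_le _ _
  have h3 : min ((xs.length % M : Nat):Int) (xs.length:Int) = ((xs.length % M : Nat):Int) := min_eq_left hRle
  simp only [PySem.List.slice?, PySem.List.sliceIndices, if_neg hMz, if_neg h1, if_neg h2, if_pos h0, h3]
  have hcomm : M * (xs.length / M) = (xs.length / M) * M := Nat.mul_comm _ _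
  have hdm : M * (xs.length / M) + xs.length % M = xs.length := Nat.div_add_mod _ _
  have hcount : (if ((xs.length % M : Nat):Int) < (xs.length:Int) then
      (((xs.length:Int) - ((xs.length % M : Nat):Int) + ((M:Nat):Int) - 1) / ((M:Nat):Int)).toNat else 0)
      = xs.length / M := by
    by_cases hc : ((xs.length % M : Nat):Int) < (xs.length:Int)
    · rw [if_pos hc]
      have e1 : (xs.length:Int) - ((xs.length % M : Nat):Int) + ((M:Nat):Int) - 1
          = (((M - 1) + (xs.length / M) * M : Nat) : Int) := by omega
      rw [e1, ← Int.natCast_div, Int.toNat_natCast]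
      rw [Nat.add_mul_div_right _ _ (by omega : 0 < M), Nat.div_eq_of_lt (by omega : M - 1 < M)]
      omega
    · rw [if_neg hc]
      have h5 : xs.length % M = xs.length := by omega
      have h6 : xs.length < M := by
        have := Nat.mod_lt xs.length (show 0 < M by omega)
        omega
      rw [Nat.div_eq_of_lt h6]
  rw [hcount]
  congr 1
  have key : ∀ x ∈ List.range (xs.length / M),
      xs[(((xs.length % M : Nat):Int) + ((M:Nat):Int) * (x:Int)).toNat]?
        = some ((xs[xs.length % M + M * x]?).getD 0) := by
    intro x hx
    have hxq : x < xs.length / M := List.mem_range.mp hx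
    have hmulle : M * (x + 1) ≤ M * (xs.length / M) := Nat.mul_le_mul_left M (by omega)
    have hma : M * (x + 1) = M * x + M := by ring
    have hi : xs.length % M + M * x < xs.length := by omega
    have ht : (((xs.length % M : Nat):Int) + ((M:Nat):Int) * (x:Int)).toNat = xs.length % M + M * x := by
      push_cast; omega
    rw [ht, List.getElem?_eq_getElem hi]
    rfl
  rw [List.filterMap_congr key,
    show (fun x => some ((xs[xs.length % M + M * x]?).getD 0))
        = some ∘ (fun x => (xs[xs.length % M + M * x]?).getD 0) from rfl,
    List.filterMap_eq_map]

lemma alt_closed (k m : Int) (score : List Int) (hm : 1 ≤ m) :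
    solution_alt k m score =
      m * ((List.range (score.length / m.toNat)).map
        (fun j => ((PySem.List.sorted score (fun x => x) false)[score.length % m.toNat + m.toNat * j]?).getD 0)).sum := by
  have hmE : m = ((m.toNat : Nat) : Int) := (Int.toNat_of_nonneg (by omega)).symm
  have hM : 1 ≤ m.toNat := by omega
  set M := m.toNat with hMdef
  set a := PySem.List.sorted score (fun x => x) false with ha
  have hal : a.length = score.length := PySem.List.length_sorted score _ false
  unfold solution_alt
  dsimp only
  rw [← ha, hmE]
  have hmod : PySem.Int.mod ((a.length : Nat) : Int) ((M:Nat):Int) = ((a.length % M : Nat) : Int) := by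
    rw [PySem.Int.mod_eq_emod_of_pos (by exact_mod_cast (by omega : 0 < M))]
    push_cast
    rfl
  rw [hmod, slice_step_closed a M hM, Option.getD_some, hal]

lemma reflect_sum (a : List Int) (M n : Nat) (hM : 1 ≤ M) (ha : a.length = n) :
    ((List.range (n / M)).map (fun j => (a.reverse[M * j + M - 1]?).getD 0)).sum
      = ((List.range (n / M)).map (fun j => (a[n % M + M * j]?).getD 0)).sum := by
  set q := n / M with hq
  set R := n % M with hR
  have hn : n = M * q + R := by rw [hq, hR]; exact (Nat.div_add_mod n M).symm
  calc ((List.range q).map (fun j => (a.reverse[M * j + M - 1]?).getD 0)).sum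
      = ∑ j ∈ Finset.range q, (a.reverse[M * j + M - 1]?).getD 0 := rfl
    _ = ∑ j ∈ Finset.range q, (a[R + M * (q - 1 - j)]?).getD 0 := by
        apply Finset.sum_congr rfl
        intro j hj
        have hj' : j < q := Finset.mem_range.mp hj
        have hadd : M * (j + 1 + (q - 1 - j)) = M * j + M + M * (q - 1 - j) := by ring
        have hq' : q = j + 1 + (q - 1 - j) := by omega
        have hMq : M * q = M * j + M + M * (q - 1 - j) := by
          conv_lhs => rw [hq']
          exact hadd
        have hn' : n = M * j + M + M * (q - 1 - j) + R := by omega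
        have hlt : M * j + M - 1 < n := by omega
        rw [List.getElem?_reverse (by rw [ha]; exact hlt)]
        rw [ha]
        have hidx : n - 1 - (M * j + M - 1) = R + M * (q - 1 - j) := by omega
        rw [hidx]
    _ = ∑ j ∈ Finset.range q, (a[R + M * j]?).getD 0 :=
        Finset.sum_range_reflect (fun j => (a[R + M * j]?).getD 0) q
    _ = ((List.range q).map (fun j => (a[R + M * j]?).getD 0)).sum := rfl

lemma solution_eq_alt (k m : Int) (score : List Int) (hm : 1 ≤ m) (hne : score ≠ []) :
    solution k m score = solution_alt k m score := by
  rw [a_closed k m score hm hne, alt_closed k m score hm, sorted_rev_eq_reverse]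
  have hl : score.length = (PySem.List.sorted score (fun x => x) false).length :=
    (PySem.List.length_sorted score _ false).symm
  rw [hl, reflect_sum _ _ _ (by omega) rfl]

-- ===== VERDICT (by name: the statement is the Claim_ definition above) =====
theorem solution_spec : Claim_equal_solution := by
  intro k m score _ hpre
  exact solution_eq_alt k m score hpre.1 hpre.2
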